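-- pv_equiv track=rewrite | github.com/hello12345-git/123 | rubiks2x2_solver.py | index_to_ori
-- ===== SOURCE A (Python) =====
-- def index_to_ori(idx):
--     co = [0] * 8
--     s = 0
--     for i in range(6, -1, -1):
--         co[i] = idx % 3
--         s += co[i]
--         idx //= 3
--     co[7] = (-s) % 3
--     return co
-- ===== SOURCE B (Python) =====
-- def index_to_ori(idx):
--     # Reduce once mod 3**7, then extract digits most-significant-first by
--     # recursive divmod with a shrinking power (no running quotient threaded LSB-first).
--     def go(r, p):
--         if p == 0:
--             return []
--         d, r = divmod(r, p)
--         return [d] + go(r, p // 3)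
--     co = go(idx % 2187, 729)
--     co.append((-sum(co)) % 3)
--     return co
-- ===== Notes on version B (the rewrite author's own statement) =====
-- stated objective: alternative
-- what changed: B reduces idx once mod 3**7 and then extracts the seven digits most-significant-first by a recursion that divmods by a shrinking power of three, instead of A's LSB-first imperative loop that threads a running quotient and running sum; the checksum digit is computed from the finished list.
import Mathlib
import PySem

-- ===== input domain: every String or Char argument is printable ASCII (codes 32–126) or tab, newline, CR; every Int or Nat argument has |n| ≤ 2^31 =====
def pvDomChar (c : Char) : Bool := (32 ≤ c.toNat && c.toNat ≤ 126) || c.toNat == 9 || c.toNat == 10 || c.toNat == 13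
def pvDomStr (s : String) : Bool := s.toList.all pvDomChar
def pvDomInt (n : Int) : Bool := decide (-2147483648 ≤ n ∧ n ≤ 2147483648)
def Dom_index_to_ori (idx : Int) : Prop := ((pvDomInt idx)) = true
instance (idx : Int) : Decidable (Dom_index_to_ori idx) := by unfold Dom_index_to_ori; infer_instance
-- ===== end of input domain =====

-- B reduces idx once mod 3^7 and extracts digits MSB-first by recursive divmod with a
-- shrinking power, instead of A's LSB-first loop threading a running quotient; same cost.

-- ===== PORT A =====
-- state (co, s, idx); the countdown loop sets co[i] = idx % 3, accumulates s, floor-divides idx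
def index_to_ori (idx : Int) : List Int :=
  let co : List Int := List.replicate 8 0
  let st := (PySem.List.pyRange 6 (-1) (-1)).foldl
    (fun (st : List Int × Int × Int) i =>
      let d := PySem.Int.mod st.2.2 3
      (st.1.set i.toNat d, st.2.1 + d, PySem.Int.floordiv st.2.2 3))
    (co, 0, idx)
  st.1.set 7 (PySem.Int.mod (-st.2.1) 3)

-- ===== PORT B =====
-- recursion on the shrinking power p (729, 243, …, 1, 0); terminates since p//3 < p for p > 0
def indexToOriGo (r p : Int) : List Int :=
  if p ≤ 0 then []
  else
    let d := PySem.Int.floordiv r p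
    let r' := PySem.Int.mod r p
    d :: indexToOriGo r' (PySem.Int.floordiv p 3)
termination_by p.toNat
decreasing_by
  have : PySem.Int.floordiv p 3 = p / 3 := PySem.Int.floordiv_eq_ediv_of_pos (by norm_num)
  rw [this]
  omega

def index_to_ori_alt (idx : Int) : List Int :=
  let co := indexToOriGo (PySem.Int.mod idx 2187) 729
  co ++ [PySem.Int.mod (-(co.sum)) 3]

-- ===== PRECONDITION & SPEC =====
def Spec_index_to_ori (idx : Int) (out : List Int) : Prop := out = index_to_ori_alt idx
instance (idx : Int) (out : List Int) : Decidable (Spec_index_to_ori idx out) := by unfold Spec_index_to_ori; infer_instance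

-- ===== CLAIM =====
def Claim_equal_index_to_ori : Prop := ∀ (idx : Int), Dom_index_to_ori idx → Spec_index_to_ori idx (index_to_ori idx)

-- ===== LEMMAS AND PROOFS =====

theorem go_step (r p : Int) (hp : 0 < p) :
    indexToOriGo r p = (r / p) :: indexToOriGo (r % p) (p / 3) := by
  rw [indexToOriGo.eq_def]
  simp [PySem.Int.floordiv_eq_ediv_of_pos hp, PySem.Int.mod_eq_emod_of_pos hp, not_le.mpr hp]

theorem go_zero (r : Int) : indexToOriGo r 0 = [] := by
  rw [indexToOriGo.eq_def]; simp

theorem go729 (r : Int) : indexToOriGo r 729 =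
    [r / 729, r % 729 / 243, r % 729 % 243 / 81, r % 729 % 243 % 81 / 27,
     r % 729 % 243 % 81 % 27 / 9, r % 729 % 243 % 81 % 27 % 9 / 3,
     r % 729 % 243 % 81 % 27 % 9 % 3 / 1] := by
  rw [go_step _ 729 (by norm_num), show ((729:Int)/3) = 243 from by norm_num,
      go_step _ 243 (by norm_num), show ((243:Int)/3) = 81 from by norm_num,
      go_step _ 81 (by norm_num), show ((81:Int)/3) = 27 from by norm_num,
      go_step _ 27 (by norm_num), show ((27:Int)/3) = 9 from by norm_num,
      go_step _ 9 (by norm_num), show ((9:Int)/3) = 3 from by norm_num,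
      go_step _ 3 (by norm_num), show ((3:Int)/3) = 1 from by norm_num,
      go_step _ 1 (by norm_num), show ((1:Int)/3) = 0 from by norm_num, go_zero]

set_option maxRecDepth 4000 in
theorem index_to_ori_eq (idx : Int) : index_to_ori idx = index_to_ori_alt idx := by
  have hm : ∀ a b : Int, 0 < b → PySem.Int.mod a b = a % b :=
    fun a b hb => PySem.Int.mod_eq_emod_of_pos hb
  have hd : ∀ a b : Int, 0 < b → PySem.Int.floordiv a b = a / b :=
    fun a b hb => PySem.Int.floordiv_eq_ediv_of_pos hb
  have hr : PySem.List.pyRange 6 (-1) (-1) = [6, 5, 4, 3, 2, 1, 0] := by decide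
  simp only [index_to_ori, index_to_ori_alt, hr, go729]
  norm_num [hm, hd, List.foldl, List.set, List.replicate,
    show (6:Int).toNat = 6 from rfl, show (5:Int).toNat = 5 from rfl,
    show (4:Int).toNat = 4 from rfl, show (3:Int).toNat = 3 from rfl,
    show (2:Int).toNat = 2 from rfl]
  refine ⟨by omega, by omega, by omega, by omega, by omega, by omega, ?_⟩
  have e1 : idx / 3 % 3 = idx % 9 / 3 := by omega
  have e2 : idx / 3 / 3 % 3 = idx % 27 / 9 := by omega
  have e3 : idx / 3 / 3 / 3 % 3 = idx % 81 / 27 := by omega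
  have e4 : idx / 3 / 3 / 3 / 3 % 3 = idx % 243 / 81 := by omega
  have e5 : idx / 3 / 3 / 3 / 3 / 3 % 3 = idx % 729 / 243 := by omega
  have e6 : idx / 3 / 3 / 3 / 3 / 3 / 3 % 3 = idx % 2187 / 729 := by omega
  rw [e1, e2, e3, e4, e5, e6]
  congr 1
  ring

-- ===== VERDICT =====
theorem index_to_ori_spec : Claim_equal_index_to_ori := by
  intro idx _
  exact index_to_ori_eq idx
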